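-- pv_equiv track=rewrite | github.com/RafaelGallo/Machine-learning---PLN-Fake-News | src/model.py | neg
-- ===== SOURCE A (Python) =====
-- def neg(text):
--     neg = ["não", "not"]
--     neg_dect = False
--     result = []
--     pal = text.split()
--
--     for x in pal:
--         x = x.lower()
--         if neg_dect == True:
--             x = x + "_NEG"
--         if x in neg:
--             neg_dect = True
--         result.append(x)
--     return ("".join(result))
-- ===== SOURCE B (Python) =====
-- def neg(text):
--     words = [w.lower() for w in text.split()]
--     for i, w in enumerate(words):
--         if w in ("não", "not"):
--             return "".join(words[:i + 1] + [x + "_NEG" for x in words[i + 1:]])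
--     return "".join(words)
-- ===== Notes on version B (the rewrite author's own statement) =====
-- stated objective: alternative
-- what changed: Replaces the sticky-flag single pass (lowercase/suffix/flag-update per token) with a two-phase decomposition: lowercase all tokens up front, locate the first negation token, then suffix only the tail after it.
import Mathlib
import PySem

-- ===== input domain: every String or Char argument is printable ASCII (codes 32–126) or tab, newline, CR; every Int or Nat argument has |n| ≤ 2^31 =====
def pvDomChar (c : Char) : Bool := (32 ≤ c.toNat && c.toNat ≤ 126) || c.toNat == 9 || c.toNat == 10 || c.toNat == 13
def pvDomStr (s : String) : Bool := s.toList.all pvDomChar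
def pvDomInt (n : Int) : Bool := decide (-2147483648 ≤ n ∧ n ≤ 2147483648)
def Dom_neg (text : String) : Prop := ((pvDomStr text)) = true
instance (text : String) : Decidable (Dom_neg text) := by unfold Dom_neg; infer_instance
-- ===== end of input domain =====

-- B replaces A's sticky-flag single pass with a locate-first-negation-then-suffix-the-tail two-phase structure (alternative decomposition, same cost).

-- ===== PORT A =====
-- A's for-loop: per token lowercase, suffix "_NEG" if the flag is set, then update the flag, appending to result.
def negLoop : List String → Bool → List String → List String
  | [], _, result => result
  | x :: rest, negDect, result =>
      let x := PySem.Str.lower x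
      let x := if negDect then x ++ "_NEG" else x
      let negDect := if x = "não" ∨ x = "not" then true else negDect
      negLoop rest negDect (result ++ [x])

def neg (text : String) : String :=
  PySem.Str.join "" (negLoop (PySem.Str.split₀ text) false [])

-- ===== PORT B =====
-- index of the first negation token (Source B's enumerate loop's search phase)
def negAltFind : List String → Option Nat
  | [] => none
  | w :: rest => if w = "não" ∨ w = "not" then some 0 else (negAltFind rest).map (· + 1)

def negAltBuild (ws : List String) : List String :=
  match negAltFind ws with
  | none => ws
  | some i => ws.take (i + 1) ++ (ws.drop (i + 1)).map (· ++ "_NEG")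

def neg_alt (text : String) : String :=
  PySem.Str.join "" (negAltBuild ((PySem.Str.split₀ text).map PySem.Str.lower))

-- ===== PRECONDITION & SPEC =====
def Spec_neg (text : String) (out : String) : Prop := out = neg_alt text
instance (text : String) (out : String) : Decidable (Spec_neg text out) := by unfold Spec_neg; infer_instance

-- ===== CLAIM (what is proved, stated in full; the proofs are below) =====
def Claim_equal_neg : Prop := ∀ (text : String), Dom_neg text → Spec_neg text (neg text)

-- ===== LEMMAS AND PROOFS =====

theorem negLoop_acc (l : List String) : ∀ (d : Bool) (res : List String),
    negLoop l d res = res ++ negLoop l d [] := by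
  induction l with
  | nil => intro d res; simp [negLoop]
  | cons x t ih =>
      intro d res
      simp only [negLoop]
      rw [ih _ (res ++ [_]), ih _ ([] ++ [_])]
      simp

theorem negLoop_true (l : List String) :
    negLoop l true [] = l.map (fun x => PySem.Str.lower x ++ "_NEG") := by
  induction l with
  | nil => simp [negLoop]
  | cons x t ih =>
      simp only [negLoop, if_true]
      rw [negLoop_acc]
      simp [ih]

theorem negLoop_eq_build (l : List String) :
    negLoop l false [] = negAltBuild (l.map PySem.Str.lower) := by
  induction l with
  | nil => simp [negLoop, negAltBuild, negAltFind]
  | cons x t ih =>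
      by_cases h : PySem.Str.lower x = "não" ∨ PySem.Str.lower x = "not"
      · simp only [negLoop, if_neg (Bool.false_ne_true), if_pos h]
        rw [negLoop_acc, negLoop_true]
        simp [negAltBuild, negAltFind, if_pos h, List.map_map, Function.comp]
      · simp only [negLoop, if_neg (Bool.false_ne_true), if_neg h]
        rw [negLoop_acc, ih]
        simp only [negAltBuild, List.map_cons, negAltFind, if_neg h]
        cases hf : negAltFind (t.map PySem.Str.lower) with
        | none => simp
        | some i => simp [List.take_succ_cons, List.drop_succ_cons]

-- ===== VERDICT (by name: the statement is the Claim_ definition above) =====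
theorem neg_spec : Claim_equal_neg := by
  intro text _
  unfold Spec_neg neg neg_alt
  rw [negLoop_eq_build]
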